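-- pv_equiv track=rewrite | github.com/dobby152/askelio | backend/multilayer_ocr/core/ocr_provider_base.py | _is_readable_word
-- ===== SOURCE A (Python) =====
-- def _is_readable_word(word: str) -> bool:
--     """Check if a word appears to be readable (not OCR garbage)"""
--     if len(word) < 2:
--         return False
--
--     # Check if word contains at least some letters
--     if not any(c.isalpha() for c in word):
--         return False
--
--     # Check for common OCR error patterns
--     ocr_patterns = ['|||', '###', '***', '???', 'lll', 'III', 'OOO', '000', '111']
--     if any(pattern in word for pattern in ocr_patterns):
--         return False
--
--     return True
-- ===== SOURCE B (Python) =====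
-- def _is_readable_word(word: str) -> bool:
--     if len(word) < 2:
--         return False
--     bad = {'|', '#', '*', '?', 'l', 'I', 'O', '0', '1'}
--     has_alpha = False
--     prev = None
--     run = 0
--     for c in word:
--         if c.isalpha():
--             has_alpha = True
--         if c == prev:
--             run += 1
--         else:
--             prev = c
--             run = 1
--         if run >= 3 and c in bad:
--             return False
--     return has_alpha
-- ===== Notes on version B (the rewrite author's own statement) =====
-- stated objective: alternative
-- what changed: Replaced the two any() scans plus a 9-pattern substring search by a single pass over the characters tracking a has-alpha flag and a run counter of consecutive identical characters, returning False as soon as a run of 3 bad characters appears.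
import Mathlib
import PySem

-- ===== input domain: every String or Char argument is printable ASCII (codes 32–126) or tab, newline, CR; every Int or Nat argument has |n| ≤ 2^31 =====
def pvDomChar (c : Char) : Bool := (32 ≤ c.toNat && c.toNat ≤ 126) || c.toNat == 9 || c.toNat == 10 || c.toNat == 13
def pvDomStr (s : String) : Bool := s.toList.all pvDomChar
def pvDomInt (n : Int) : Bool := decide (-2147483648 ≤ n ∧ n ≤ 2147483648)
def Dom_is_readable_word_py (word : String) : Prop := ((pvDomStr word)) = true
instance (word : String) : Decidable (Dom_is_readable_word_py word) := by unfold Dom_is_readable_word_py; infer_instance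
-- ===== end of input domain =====

-- B replaces the two any() scans plus the 9-pattern substring search by one pass with a run counter (objective: alternative decomposition, same cost).

-- ===== PORT A =====
def is_readable_word_py (word : String) : Bool :=
  if PySem.Str.len word < 2 then false
  else if !(word.toList.any PySem.Chars.isalpha) then false
  else
    let ocr_patterns : List String := ["|||", "###", "***", "???", "lll", "III", "OOO", "000", "111"]
    if ocr_patterns.any (fun p => PySem.Str.isIn p word) then false
    else true

-- ===== PORT B =====
-- the set literal `bad` of Source B
def pvBad : PySem.Set Char := PySem.Set.ofList ['|', '#', '*', '?', 'l', 'I', 'O', '0', '1']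

-- the for-loop of Source B, with its early `return False`
def pvAltLoop : List Char → Bool → Option Char → Nat → Bool
  | [], hasAlpha, _, _ => hasAlpha
  | c :: rest, hasAlpha, prev, run =>
    let hasAlpha := hasAlpha || PySem.Chars.isalpha c
    let run := if some c == prev then run + 1 else 1
    if 3 ≤ run && PySem.Set.contains pvBad c then false
    else pvAltLoop rest hasAlpha (some c) run

def is_readable_word_py_alt (word : String) : Bool :=
  if PySem.Str.len word < 2 then false
  else pvAltLoop word.toList false none 0

-- ===== PRECONDITION & SPEC =====
def Spec_is_readable_word_py (word : String) (out : Bool) : Prop := out = is_readable_word_py_alt word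
instance (word : String) (out : Bool) : Decidable (Spec_is_readable_word_py word out) := by unfold Spec_is_readable_word_py; infer_instance

-- ===== CLAIM (what is proved, stated in full; the proofs are below) =====
def Claim_equal_is_readable_word_py : Prop := ∀ (word : String), Dom_is_readable_word_py word → Spec_is_readable_word_py word (is_readable_word_py word)

-- ===== LEMMAS AND PROOFS =====

-- the failure condition of B's loop, separated from the has_alpha accumulation
def pvBadFrom : List Char → Option Char → Nat → Bool
  | [], _, _ => false
  | c :: rest, prev, run =>
    let run := if some c == prev then run + 1 else 1
    (3 ≤ run && PySem.Set.contains pvBad c) || pvBadFrom rest (some c) run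

-- "some run of 3 consecutive equal bad characters occurs", structurally
def pvTriple : List Char → Bool
  | a :: b :: c :: rest => (a == b && b == c && PySem.Set.contains pvBad a) || pvTriple (b :: c :: rest)
  | _ => false

theorem pvAltLoop_eq (l : List Char) : ∀ (ha : Bool) (prev : Option Char) (run : Nat),
    pvAltLoop l ha prev run = ((ha || l.any PySem.Chars.isalpha) && !(pvBadFrom l prev run)) := by
  induction l with
  | nil => intro ha prev run; simp [pvAltLoop, pvBadFrom]
  | cons c rest ih =>
    intro ha prev run
    simp only [pvAltLoop, pvBadFrom]
    cases h3 : decide (3 ≤ (if some c == prev then run + 1 else 1)) <;>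
      cases hb : PySem.Set.contains pvBad c <;>
        simp [ih, List.any_cons, Bool.or_assoc]

-- take-based unfolding of pvTriple at a cons
theorem pvTriple_cons (c : Char) (rest : List Char) :
    pvTriple (c :: rest) = true ↔
      (rest.take 2 = [c, c] ∧ c ∈ pvBad) ∨ pvTriple rest = true := by
  rcases rest with _ | ⟨b, _ | ⟨d, t⟩⟩
  · simp [pvTriple]
  · simp [pvTriple]
  · by_cases hbc : b = c <;> by_cases hdc : d = c <;>
      simp [pvTriple, hbc, hdc] <;> aesop

theorem take_one_eq_iff (l : List Char) (x : Char) :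
    l.take 1 = [x] ↔ l.head? = some x := by
  cases l <;> simp

theorem take_two_head (l : List Char) (x : Char) (h : l.take 2 = [x, x]) :
    l.head? = some x := by
  cases l <;> simp_all

theorem pvBadFrom_some (l : List Char) : ∀ (p : Char) (k : Nat), 1 ≤ k →
    (3 ≤ k → ¬ p ∈ pvBad) →
    (pvBadFrom l (some p) k = true ↔
      pvTriple l = true ∨ (p ∈ pvBad ∧
        ((2 ≤ k ∧ l.head? = some p) ∨ (k = 1 ∧ l.take 2 = [p, p])))) := by
  induction l with
  | nil =>
    intro p k _ _
    simp [pvBadFrom, pvTriple]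
  | cons c rest ih =>
    intro p k hk1 hk3
    by_cases hc : c = p
    · subst hc
      by_cases hb : c ∈ pvBad
      · by_cases hk2 : 2 ≤ k
        · have h3 : 3 ≤ k + 1 := by omega
          simp [pvBadFrom, hb, h3, hk2]
        · have hk1' : k = 1 := by omega
          subst hk1'
          have hrec := ih c 2 (by omega) (by omega)
          have hstep : pvBadFrom (c :: rest) (some c) 1 =
              (decide (3 ≤ 2) && PySem.Set.contains pvBad c || pvBadFrom rest (some c) 2) := by
            simp [pvBadFrom]
          rw [hstep, Bool.or_eq_true, hrec, pvTriple_cons]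
          have e1 : List.take 2 (c :: rest) = [c, c] ↔ rest.head? = some c := by
            cases rest <;> simp
          have e2 : rest.take 2 = [c, c] → rest.head? = some c := take_two_head rest c
          have e3 := take_one_eq_iff rest c
          norm_num [e1]
          tauto
      · have hbf : (PySem.Set.contains pvBad c) = false := by
          simp [hb]
        have hrec := ih c (k + 1) (by omega) (fun _ => hb)
        have hstep : pvBadFrom (c :: rest) (some c) k =
            (decide (3 ≤ k + 1) && PySem.Set.contains pvBad c || pvBadFrom rest (some c) (k + 1)) := by
          simp [pvBadFrom]
        rw [hstep, Bool.or_eq_true, hrec, pvTriple_cons]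
        simp only [hbf, Bool.and_false, Bool.false_eq_true, false_or]
        tauto
    · have hne : (some c == some p) = false := by simp [hc]
      have hrec := ih c 1 (le_refl 1) (by omega)
      have hstep : pvBadFrom (c :: rest) (some p) k = pvBadFrom rest (some c) 1 := by
        simp [pvBadFrom, hne]
      rw [hstep, hrec, pvTriple_cons]
      have hcp : ¬ ((c :: rest).head? = some p) := by simp [hc]
      have htk : ¬ ((c :: rest).take 2 = [p, p]) := fun h => hc (by simpa using take_two_head _ _ h)
      norm_num
      tauto

theorem pvBadFrom_none (l : List Char) : pvBadFrom l none 0 = pvTriple l := by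
  cases l with
  | nil => rfl
  | cons c rest =>
    rw [Bool.eq_iff_iff]
    have hne : (some c == (none : Option Char)) = false := rfl
    simp only [pvBadFrom, hne, Bool.false_eq_true, ite_false]
    rw [Bool.or_eq_true, pvBadFrom_some rest c 1 (le_refl 1) (by omega), pvTriple_cons]
    simp
    tauto

theorem pvTriple_iff (l : List Char) :
    pvTriple l = true ↔ ∃ c, c ∈ pvBad ∧ [c, c, c] <:+: l := by
  induction l with
  | nil =>
    simp only [pvTriple]
    constructor
    · intro h; simp at h
    · rintro ⟨c, _, h⟩
      have := h.length_le
      simp at this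
  | cons a rest ih =>
    rw [pvTriple_cons, ih]
    constructor
    · rintro (⟨ht, hb⟩ | ⟨c, hc, hinf⟩)
      · refine ⟨a, hb, ?_⟩
        have hpre : [a, a] <+: rest := by
          rw [List.prefix_iff_eq_take]; simp [ht]
        exact (List.cons_prefix_cons.2 ⟨rfl, hpre⟩).isInfix
      · exact ⟨c, hc, hinf.trans (List.suffix_cons a rest).isInfix⟩
    · rintro ⟨c, hc, hinf⟩
      rw [List.infix_cons_iff] at hinf
      rcases hinf with hpre | hinf
      · rcases List.cons_prefix_cons.1 hpre with ⟨rfl, hpre2⟩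
        refine .inl ⟨?_, hc⟩
        have := List.prefix_iff_eq_take.1 hpre2
        simpa using this.symm
      · exact .inr ⟨c, hc, hinf⟩

set_option maxRecDepth 8192 in
theorem patterns_eq (s : String) :
    (["|||", "###", "***", "???", "lll", "III", "OOO", "000", "111"].any
      (fun p => PySem.Str.isIn p s)) = pvTriple s.toList := by
  have hmem : ∀ c : Char, c ∈ pvBad ↔
      (c = '|' ∨ c = '#' ∨ c = '*' ∨ c = '?' ∨ c = 'l' ∨ c = 'I' ∨ c = 'O' ∨ c = '0' ∨ c = '1') := by
    intro c
    rw [show pvBad = PySem.Set.ofList ['|', '#', '*', '?', 'l', 'I', 'O', '0', '1'] from rfl,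
      PySem.Set.mem_ofList]
    simp
  have t1 : "|||".toList = ['|', '|', '|'] := rfl
  have t2 : "###".toList = ['#', '#', '#'] := rfl
  have t3 : "***".toList = ['*', '*', '*'] := rfl
  have t4 : "???".toList = ['?', '?', '?'] := rfl
  have t5 : "lll".toList = ['l', 'l', 'l'] := rfl
  have t6 : "III".toList = ['I', 'I', 'I'] := rfl
  have t7 : "OOO".toList = ['O', 'O', 'O'] := rfl
  have t8 : "000".toList = ['0', '0', '0'] := rfl
  have t9 : "111".toList = ['1', '1', '1'] := rfl
  rw [Bool.eq_iff_iff, pvTriple_iff]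
  simp only [List.any_cons, List.any_nil, Bool.or_eq_true, Bool.false_eq_true, or_false,
    PySem.Str.isIn_iff_infix, t1, t2, t3, t4, t5, t6, t7, t8, t9, hmem, or_and_right,
    exists_or, exists_eq_left]

-- ===== VERDICT (by name: the statement is the Claim_ definition above) =====
theorem is_readable_word_py_spec : Claim_equal_is_readable_word_py := by
  intro word _
  unfold Spec_is_readable_word_py is_readable_word_py is_readable_word_py_alt
  by_cases hlen : PySem.Str.len word < 2
  · rw [if_pos hlen, if_pos hlen]
  · rw [if_neg hlen, if_neg hlen, pvAltLoop_eq, pvBadFrom_none]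
    by_cases ha : word.toList.any PySem.Chars.isalpha = true
    · simp only [ha, Bool.not_true, Bool.false_eq_true, ite_false, Bool.false_or, Bool.true_and]
      rw [patterns_eq]
      cases htr : pvTriple word.toList <;> simp
    · simp only [Bool.not_eq_true] at ha
      simp [ha]
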